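-- pv_equiv track=rewrite | github.com/wnkdsmm/base_import | app/dashboard/metadata.py | _prefer_original_source_tables
-- ===== SOURCE A (Python) =====
-- from typing import Any, Dict, List, Optional, Sequence
--
-- def _is_clean_source_table(table_name: str) -> bool:
--     normalized = str(table_name or "").strip()
--     return normalized.casefold().startswith("clean_") and len(normalized) > len("clean_")
--
-- def _source_table_canonical_key(table_name: str) -> str:
--     normalized = str(table_name or "").strip()
--     if _is_clean_source_table(normalized):
--         normalized = normalized[len("clean_") :]
--     return normalized.casefold()
--
-- def _prefer_original_source_tables(table_names: Sequence[str]) -> List[str]: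
--     selected_by_key: Dict[str, str] = {}
--     for raw_name in table_names:
--         normalized = str(raw_name or "").strip()
--         if not normalized:
--             continue
--         key = _source_table_canonical_key(normalized)
--         current = selected_by_key.get(key)
--         if current is None:
--             selected_by_key[key] = normalized
--             continue
--         current_is_clean = _is_clean_source_table(current)
--         normalized_is_clean = _is_clean_source_table(normalized)
--         if current_is_clean and not normalized_is_clean:
--             selected_by_key[key] = normalized
--     return list(selected_by_key.values())
-- ===== SOURCE B (Python) =====
-- from typing import Dict, List, Sequence
--
-- def _is_clean_source_table(table_name: str) -> bool:
--     normalized = str(table_name or "").strip()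
--     return normalized.casefold().startswith("clean_") and len(normalized) > len("clean_")
--
-- def _source_table_canonical_key(table_name: str) -> str:
--     normalized = str(table_name or "").strip()
--     if _is_clean_source_table(normalized):
--         normalized = normalized[len("clean_") :]
--     return normalized.casefold()
--
-- def _prefer_original_source_tables(table_names: Sequence[str]) -> List[str]:
--     # Group-then-pick: collect the normalized names per canonical key, then
--     # pick the first non-clean name of each group (falling back to the first).
--     groups: Dict[str, List[str]] = {}
--     for raw_name in table_names:
--         normalized = str(raw_name or "").strip()
--         if not normalized:
--             continue
--         groups.setdefault(_source_table_canonical_key(normalized), []).append(normalized)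
--     return [
--         next((n for n in names if not _is_clean_source_table(n)), names[0])
--         for names in groups.values()
--     ]
-- ===== Notes on version B (the rewrite author's own statement) =====
-- stated objective: alternative
-- what changed: Replaces A's incremental keep-or-replace dict loop with a two-phase group-then-pick decomposition: first group the normalized names per canonical key, then select the first non-clean name of each group (falling back to the group's first name).
import Mathlib
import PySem

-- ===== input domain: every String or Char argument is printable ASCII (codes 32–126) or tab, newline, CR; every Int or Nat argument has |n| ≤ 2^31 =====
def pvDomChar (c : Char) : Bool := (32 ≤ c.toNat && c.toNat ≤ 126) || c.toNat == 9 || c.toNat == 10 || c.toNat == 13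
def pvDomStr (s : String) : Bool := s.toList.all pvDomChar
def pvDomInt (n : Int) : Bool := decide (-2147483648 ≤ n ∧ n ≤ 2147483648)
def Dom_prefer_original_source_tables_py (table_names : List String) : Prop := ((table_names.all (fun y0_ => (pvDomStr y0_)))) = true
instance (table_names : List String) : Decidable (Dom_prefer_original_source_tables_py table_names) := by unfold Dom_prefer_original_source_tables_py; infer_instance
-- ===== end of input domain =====

-- B replaces A's incremental keep-or-replace dict loop by a group-then-pick
-- decomposition (group the normalized names per canonical key, then select the
-- first non-clean name of each group); objective: alternative, same cost.

-- ===== PORT A =====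
-- _is_clean_source_table (casefold = lower on the ASCII domain)
def pyIsClean (t : String) : Bool :=
  let n := PySem.Str.strip t
  PySem.Str.startswith (PySem.Str.lower n) "clean_" && decide (6 < PySem.Str.len n)

-- _source_table_canonical_key
def pyKey (t : String) : String :=
  let n := PySem.Str.strip t
  let n := if pyIsClean n then PySem.Str.slice n (some 6) none else n
  PySem.Str.lower n

def prefer_original_source_tables_py (table_names : List String) : List String :=
  (table_names.foldl (fun (d : PySem.Dict String String) raw =>
      let normalized := PySem.Str.strip raw
      if normalized = "" then d
      else
        let key := pyKey normalized
        match d.get? key with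
        | none => d.insert key normalized
        | some current =>
          if pyIsClean current && !pyIsClean normalized then d.insert key normalized
          else d)
    PySem.Dict.empty).values

-- ===== PORT B =====
-- next((n for n in names if not _is_clean_source_table(n)), names[0])
-- (names is never empty; headD "" is the names[0] fallback)
def pickOriginal (names : List String) : String :=
  (names.find? (fun n => !pyIsClean n)).getD (names.headD "")

def prefer_original_source_tables_py_alt (table_names : List String) : List String :=
  let groups : PySem.Dict String (List String) :=
    table_names.foldl (fun d raw =>
      let normalized := PySem.Str.strip raw
      if normalized = "" then d
      else d.modify (pyKey normalized) [] (· ++ [normalized])) PySem.Dict.empty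
  groups.values.map pickOriginal

-- ===== PRECONDITION & SPEC =====
def Spec_prefer_original_source_tables_py (table_names : List String) (out : List String) : Prop := out = prefer_original_source_tables_py_alt table_names
instance (table_names : List String) (out : List String) : Decidable (Spec_prefer_original_source_tables_py table_names out) := by unfold Spec_prefer_original_source_tables_py; infer_instance

-- ===== CLAIM (what is proved, stated in full; the proofs are below) =====
def Claim_equal_prefer_original_source_tables_py : Prop := ∀ (table_names : List String), Dom_prefer_original_source_tables_py table_names → Spec_prefer_original_source_tables_py table_names (prefer_original_source_tables_py table_names)

-- ===== LEMMAS AND PROOFS =====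

-- A's per-name dict step (on an already-normalized, nonempty name)
def stepAK (d : PySem.Dict String String) (k n : String) : PySem.Dict String String :=
  match d.get? k with
  | none => d.insert k n
  | some current =>
    if pyIsClean current && !pyIsClean n then d.insert k n else d

def stepA (d : PySem.Dict String String) (n : String) : PySem.Dict String String :=
  stepAK d (pyKey n) n

-- B's per-name grouping step
def stepBK (d : PySem.Dict String (List String)) (k n : String) : PySem.Dict String (List String) :=
  d.modify k [] (· ++ [n])

def stepB (d : PySem.Dict String (List String)) (n : String) : PySem.Dict String (List String) :=
  stepBK d (pyKey n) n

def mpPick (p : String × List String) : String × String := (p.1, pickOriginal p.2)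

-- the invariant tying A's dict to B's grouping dict
def DictInv (dA : PySem.Dict String String) (dB : PySem.Dict String (List String)) : Prop :=
  dA.items = dB.items.map mpPick ∧ dB.keys.Nodup ∧ ∀ p ∈ dB.items, p.2 ≠ []

lemma pick_singleton (n : String) : pickOriginal [n] = n := by
  simp [pickOriginal, List.find?]
  cases h : pyIsClean n <;> simp

lemma pick_append (names : List String) (n : String) (hne : names ≠ []) :
    pickOriginal (names ++ [n]) =
      if pyIsClean (pickOriginal names) && !pyIsClean n then n else pickOriginal names := by
  cases hf : names.find? (fun x => !pyIsClean x) with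
  | some m =>
    have hm : (!pyIsClean m) = true := by
      have hf' := hf; rw [List.find?_eq_some_iff_append] at hf'; exact hf'.1
    have hm2 : pyIsClean m = false := by simpa using hm
    simp [pickOriginal, List.find?_append, hf, hm2]
  | none =>
    obtain ⟨h₀, t, rfl⟩ : ∃ h₀ t, names = h₀ :: t := by
      cases names with
      | nil => exact absurd rfl hne
      | cons a b => exact ⟨a, b, rfl⟩
    have hc : pyIsClean h₀ = true := by
      have := List.find?_eq_none.mp hf h₀ (by simp)
      simpa using this
    simp [List.find?, hc] at hf
    have hft : t.find? (fun x => !pyIsClean x) = none :=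
      List.find?_eq_none.mpr (by intro x hx; simpa using hf x hx)
    cases hn : pyIsClean n with
    | false =>
      simp [pickOriginal, List.find?_append, List.find?, hn, hc, hft]
    | true =>
      simp [pickOriginal, List.find?_append, List.find?, hn, hc, hft]

lemma get?_rel {dA : PySem.Dict String String} {dB : PySem.Dict String (List String)}
    (h : DictInv dA dB) (k : String) : dA.get? k = (dB.get? k).map pickOriginal := by
  simp only [PySem.Dict.get?, h.1, List.find?_map]
  have : (fun (p : String × String) => p.1 == k) ∘ mpPick
       = (fun (p : String × List String) => p.1 == k) := rfl
  rw [this]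
  cases List.find? (fun p => p.1 == k) dB.items <;> simp [mpPick]

lemma stepK_inv {dA : PySem.Dict String String} {dB : PySem.Dict String (List String)}
    (h : DictInv dA dB) (k n : String) : DictInv (stepAK dA k n) (stepBK dB k n) := by
  obtain ⟨hitems, hnd, hval⟩ := h
  have hget := get?_rel ⟨hitems, hnd, hval⟩ k
  cases hB : dB.get? k with
  | none =>
    have hcontB : dB.contains k = false := by
      rw [PySem.Dict.contains_eq_isSome_get?, hB]; rfl
    have hcontA : dA.contains k = false := by
      rw [PySem.Dict.contains_eq_isSome_get?, hget, hB]; rfl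
    have hstepB : stepBK dB k n = dB.insert k [n] := by
      simp [stepBK, PySem.Dict.modify, PySem.Dict.getD_of_not_contains dB [] hcontB]
    have hstepA : stepAK dA k n = dA.insert k n := by
      unfold stepAK; rw [hget, hB]; rfl
    refine ⟨?_, ?_, ?_⟩
    · rw [hstepA, hstepB, PySem.Dict.items_insert_of_not_contains dA n hcontA,
        PySem.Dict.items_insert_of_not_contains dB [n] hcontB]
      simp [hitems, mpPick, pick_singleton]
    · rw [hstepB]; exact PySem.Dict.nodup_keys_insert dB k [n] hnd
    · rw [hstepB]; intro p hp
      rcases (PySem.Dict.mem_items_insert _ _ _ p).mp hp with rfl | ⟨hp', _⟩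
      · simp
      · exact hval p hp'
  | some names =>
    have hne : names ≠ [] := hval (k, names) (PySem.Dict.mem_items_of_get?_eq_some dB hB)
    have hcontB : dB.contains k = true := by
      rw [PySem.Dict.contains_eq_isSome_get?, hB]; rfl
    have hgd : dB.getD k [] = names := by simp [PySem.Dict.getD, hB]
    have hstepB : stepBK dB k n = dB.insert k (names ++ [n]) := by
      simp [stepBK, PySem.Dict.modify, hgd]
    have hBitems : (stepBK dB k n).items
        = dB.items.map (fun p => if p.1 == k then (k, names ++ [n]) else p) := by
      rw [hstepB]; exact PySem.Dict.items_insert_of_contains dB _ hcontB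
    have hkeyval : ∀ p ∈ dB.items, p.1 = k → p.2 = names := by
      intro p hp hpk
      have := PySem.Dict.get?_of_mem_items dB (k := p.1) (v := p.2) (by simpa using hp) hnd
      rw [hpk, hB] at this
      exact (Option.some_injective _ this.symm)
    have hmap : ∀ cond : Bool, (pyIsClean (pickOriginal names) && !pyIsClean n) = cond →
        (stepBK dB k n).items.map mpPick
        = dB.items.map (fun p => if p.1 == k then (if cond then (k, n) else mpPick p) else mpPick p) := by
      intro cond hcond
      rw [hBitems, List.map_map]
      refine List.map_congr_left ?_
      rintro ⟨p1, p2⟩ hp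
      by_cases hpk : p1 = k
      · subst hpk
        have hv := hkeyval (p1, p2) hp rfl
        subst hv
        cases cond <;>
          simp [Function.comp, mpPick, pick_append p2 n hne, hcond]
      · simp [Function.comp, hpk, mpPick]
    have hAget : dA.get? k = some (pickOriginal names) := by rw [hget, hB]; rfl
    have hcontA : dA.contains k = true := by
      rw [PySem.Dict.contains_eq_isSome_get?, hAget]; rfl
    refine ⟨?_, ?_, ?_⟩
    · cases hcond : (pyIsClean (pickOriginal names) && !pyIsClean n) with
      | true =>
        have hstepA : stepAK dA k n = dA.insert k n := by
          unfold stepAK; rw [hAget]; simp [hcond]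
        rw [hstepA, PySem.Dict.items_insert_of_contains dA n hcontA, hmap true hcond, hitems,
          List.map_map]
        refine List.map_congr_left ?_
        intro p hp
        by_cases hpk : p.1 = k <;> simp [Function.comp, mpPick, hpk]
      | false =>
        have hstepA : stepAK dA k n = dA := by
          unfold stepAK; rw [hAget]; simp [hcond]
        rw [hstepA, hmap false hcond, hitems]
        refine List.map_congr_left ?_
        intro p hp
        by_cases hpk : p.1 = k <;> simp [hpk]
    · rw [hstepB]; exact PySem.Dict.nodup_keys_insert dB k _ hnd
    · rw [hstepB]; intro p hp
      rcases (PySem.Dict.mem_items_insert _ _ _ p).mp hp with rfl | ⟨hp', _⟩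
      · simp
      · exact hval p hp'

lemma step_inv {dA : PySem.Dict String String} {dB : PySem.Dict String (List String)}
    (h : DictInv dA dB) (n : String) : DictInv (stepA dA n) (stepB dB n) :=
  stepK_inv h (pyKey n) n

lemma fold_inv (ns : List String) {dA : PySem.Dict String String}
    {dB : PySem.Dict String (List String)} (h : DictInv dA dB) :
    DictInv (ns.foldl stepA dA) (ns.foldl stepB dB) := by
  induction ns generalizing dA dB with
  | nil => exact h
  | cons n t ih => exact ih (step_inv h n)

-- a strip-then-skip-empty loop is a fold over the filtered stripped names
lemma foldl_strip_filter {b : Type} (g : b -> String -> b) (l : List String) (d : b) :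
    l.foldl (fun d raw =>
      let n := PySem.Str.strip raw
      if n = "" then d else g d n) d
    = ((l.map PySem.Str.strip).filter (fun n => !(n == ""))).foldl g d := by
  induction l generalizing d with
  | nil => rfl
  | cons a t ih =>
    simp only [List.foldl_cons, List.map_cons, List.filter_cons]
    by_cases ha : PySem.Str.strip a = "" <;> simp [ha, ih]

-- both folds, with the empty-skip branch made explicit as a filter over the stripped names
lemma foldA_eq (table_names : List String) :
    prefer_original_source_tables_py table_names
      = (((table_names.map PySem.Str.strip).filter (fun n => !(n == ""))).foldl
          stepA PySem.Dict.empty).values := by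
  show (table_names.foldl (fun d raw =>
      let n := PySem.Str.strip raw
      if n = "" then d else stepA d n) PySem.Dict.empty).values = _
  rw [foldl_strip_filter]

lemma foldB_eq (table_names : List String) :
    prefer_original_source_tables_py_alt table_names
      = ((((table_names.map PySem.Str.strip).filter (fun n => !(n == ""))).foldl
          stepB PySem.Dict.empty).values).map pickOriginal := by
  show ((table_names.foldl (fun d raw =>
      let n := PySem.Str.strip raw
      if n = "" then d else stepB d n) PySem.Dict.empty).values).map pickOriginal = _
  rw [foldl_strip_filter]

-- ===== VERDICT (by name: the statement is the Claim_ definition above) =====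
theorem prefer_original_source_tables_py_spec : Claim_equal_prefer_original_source_tables_py := by
  intro table_names _
  unfold Spec_prefer_original_source_tables_py
  rw [foldA_eq, foldB_eq]
  have h := fold_inv ((table_names.map PySem.Str.strip).filter (fun n => !(n == "")))
    (dA := PySem.Dict.empty) (dB := PySem.Dict.empty) ⟨rfl, List.nodup_nil, by simp [PySem.Dict.empty]⟩
  simp only [PySem.Dict.values, h.1, List.map_map]
  rfl
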